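-- pv_equiv track=rewrite | github.com/Florisheinen1/AOC | 2022/ass6/ass6.py | ass
-- ===== SOURCE A (Python) =====
-- def contains_double(l):
--     for i in range(len(l)):
--         if l[i] in l[i+1:]:
--             return True
--     return False
--
-- def ass(l, count):
--     past = []
--
--     for i in range(len(l)):
--         c = l[i]
--         past.insert(0, c)
--         if len(past) > count:
--             past.pop()
--             if not contains_double(past):
--                 return i + 1
-- ===== SOURCE B (Python) =====
-- def ass(l, count):
--     # One pass with a sliding window of the last `count` characters: a character
--     # -> occurrence-count map plus a running number of duplicated characters,
--     # updated incrementally, replaces A's insert/pop list and quadratic scan.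
--     # Nonpositive counts mean an empty window, which is trivially distinct.
--     w = max(count, 0)
--     counts = {}
--     dups = 0
--     for i, c in enumerate(l):
--         n = counts.get(c, 0) + 1
--         counts[c] = n
--         if n == 2:
--             dups += 1
--         if i >= w:
--             d = l[i - w]
--             m = counts[d] - 1
--             counts[d] = m
--             if m == 1:
--                 dups -= 1
--             if dups == 0:
--                 return i + 1
--     return None
-- ===== Notes on version B (the rewrite author's own statement) =====
-- stated objective: faster
-- what changed: Replaces the incrementally maintained insert/pop `past` list with its quadratic pairwise duplicate scan by a single pass keeping a sliding-window character->occurrence-count map and a running duplicate counter, updated in O(1) per character.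
import Mathlib
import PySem

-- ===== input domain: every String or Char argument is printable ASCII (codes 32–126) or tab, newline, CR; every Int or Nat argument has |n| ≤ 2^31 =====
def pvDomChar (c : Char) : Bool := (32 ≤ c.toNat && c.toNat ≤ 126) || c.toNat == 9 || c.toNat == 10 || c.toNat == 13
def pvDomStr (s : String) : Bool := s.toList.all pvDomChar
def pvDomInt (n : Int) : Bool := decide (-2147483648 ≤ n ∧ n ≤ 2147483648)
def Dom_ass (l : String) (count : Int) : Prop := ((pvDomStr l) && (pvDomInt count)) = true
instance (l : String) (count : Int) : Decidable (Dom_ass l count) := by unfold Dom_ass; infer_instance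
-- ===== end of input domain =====

-- B replaces A's insert/pop list + quadratic duplicate scan with a one-pass
-- sliding-window occurrence-count map and an incremental duplicate counter.

-- ===== PORT A =====
-- contains_double: 'for i in range(len(l)): if l[i] in l[i+1:]: return True; return False'
-- (l[i+1:] on the in-range natural index i+1 is exactly List.drop (i+1))
def containsDoubleAux (l : List Char) (i : Nat) : Bool :=
  if h : i < l.length then
    if (l.drop (i + 1)).contains l[i] then true
    else containsDoubleAux l (i + 1)
  else false
termination_by l.length - i

def containsDouble (l : List Char) : Bool := containsDoubleAux l 0

-- the main loop of A: past.insert(0, c) = cons; past.pop() = dropLast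
def assLoop (l : List Char) (count : Int) (past : List Char) (i : Nat) : Option Int :=
  if h : i < l.length then
    let c := l[i]
    let past1 := c :: past
    if (past1.length : Int) > count then
      let past2 := past1.dropLast
      if !containsDouble past2 then some ((i : Int) + 1)
      else assLoop l count past2 (i + 1)
    else assLoop l count past1 (i + 1)
  else none
termination_by l.length - i

def ass (l : String) (count : Int) : Option Int :=
  assLoop l.toList count [] 0

-- ===== PORT B =====
-- 'for i, c in enumerate(l): n = counts.get(c,0)+1; counts[c] = n; if n == 2: dups += 1;
--  if i >= w: d = l[i-w]; m = counts[d]-1; counts[d] = m; if m == 1: dups -= 1;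
--  if dups == 0: return i+1'  (the index i-w of l is in range since w ≤ i < len(l))
def assAltLoop (l : List Char) (w : Nat) (counts : PySem.Dict Char Int) (dups : Int)
    (i : Nat) : Option Int :=
  if h : i < l.length then
    let c := l[i]
    let n := counts.getD c 0 + 1
    let counts1 := counts.insert c n
    let dups1 := if n = 2 then dups + 1 else dups
    if hw : w ≤ i then
      let d := l[i - w]'(by omega)
      let m := counts1.getD d 0 - 1
      let counts2 := counts1.insert d m
      let dups2 := if m = 1 then dups1 - 1 else dups1
      if dups2 = 0 then some ((i : Int) + 1)
      else assAltLoop l w counts2 dups2 (i + 1)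
    else assAltLoop l w counts1 dups1 (i + 1)
  else none
termination_by l.length - i

def ass_alt (l : String) (count : Int) : Option Int :=
  assAltLoop l.toList ((max count 0).toNat) PySem.Dict.empty 0 0

-- ===== PRECONDITION & SPEC =====
def Spec_ass (l : String) (count : Int) (out : Option Int) : Prop := out = ass_alt l count
instance (l : String) (count : Int) (out : Option Int) : Decidable (Spec_ass l count out) := by unfold Spec_ass; infer_instance

-- ===== CLAIM (what is proved, stated in full; the proofs are below) =====
def Claim_equal_ass : Prop := ∀ (l : String) (count : Int), Dom_ass l count → Spec_ass l count (ass l count)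

-- ===== LEMMAS AND PROOFS =====

theorem containsDoubleAux_eq (l : List Char) (i : Nat) :
    containsDoubleAux l i = !decide (l.drop i).Nodup := by
  induction i using containsDoubleAux.induct (l := l) with
  | case1 i h hc =>
    rw [containsDoubleAux]
    simp only [dif_pos h, hc, if_true]
    have hmem : l[i] ∈ l.drop (i + 1) := by simpa using hc
    have hnn : ¬ (l.drop i).Nodup := by
      rw [List.drop_eq_getElem_cons h, List.nodup_cons]
      intro hnd; exact hnd.1 hmem
    simp [hnn]
  | case2 i h hc ih =>
    rw [containsDoubleAux]
    simp only [dif_pos h]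
    rw [if_neg hc, ih]
    have hmem : l[i] ∉ l.drop (i + 1) := by simpa using hc
    have hiff : (l.drop i).Nodup ↔ (l.drop (i + 1)).Nodup := by
      rw [List.drop_eq_getElem_cons h, List.nodup_cons]
      exact ⟨fun hnd => hnd.2, fun hnd => ⟨hmem, hnd⟩⟩
    simp [hiff]
  | case3 i h =>
    rw [containsDoubleAux]
    simp [dif_neg h, List.drop_eq_nil_of_le (by omega : l.length ≤ i)]

theorem containsDouble_eq (l : List Char) :
    containsDouble l = !decide l.Nodup := by
  simpa using containsDoubleAux_eq l 0

-- number of distinct characters occurring at least twice (the ghost value of B's `dups`)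
def dupCount (s : List Char) : Int :=
  ((s.toFinset.filter (fun c => 2 ≤ s.count c)).card : Int)

theorem dupCount_nil : dupCount [] = 0 := by simp [dupCount]

theorem dupCount_cons (s : List Char) (x : Char) :
    dupCount (x :: s) = dupCount s + (if s.count x = 1 then 1 else 0) := by
  have key : ((x :: s).toFinset.filter (fun c => 2 ≤ (x :: s).count c)) =
      if s.count x = 1 then insert x (s.toFinset.filter (fun c => 2 ≤ s.count c))
      else s.toFinset.filter (fun c => 2 ≤ s.count c) := by
    split_ifs with hx1
    · ext y
      by_cases hyx : y = x
      · subst hyx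
        simp [List.count_cons, ← List.count_pos_iff, hx1]
      · have hxy : ¬ x = y := fun hh => hyx hh.symm
        simp [List.count_cons, ← List.count_pos_iff, hyx, hxy]
    · ext y
      by_cases hyx : y = x
      · subst hyx
        simp [List.count_cons, ← List.count_pos_iff]
        omega
      · have hxy : ¬ x = y := fun hh => hyx hh.symm
        simp [List.count_cons, ← List.count_pos_iff, hyx, hxy]
  unfold dupCount
  rw [key]
  split_ifs with hx1
  · have hnm : x ∉ s.toFinset.filter (fun c => 2 ≤ s.count c) := by
      simp [Finset.mem_filter]
      intro _
      omega
    rw [Finset.card_insert_of_notMem hnm]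
    push_cast
    ring
  · simp

theorem dupCount_perm {s t : List Char} (h : s.Perm t) : dupCount s = dupCount t := by
  unfold dupCount
  have htf : s.toFinset = t.toFinset := by
    ext y; simp [List.mem_toFinset, h.mem_iff]
  rw [htf]
  have hf : Finset.filter (fun c => 2 ≤ s.count c) t.toFinset =
      Finset.filter (fun c => 2 ≤ t.count c) t.toFinset :=
    Finset.filter_congr (fun y _ => by rw [h.count_eq])
  rw [hf]

theorem dupCount_append_singleton (s : List Char) (c : Char) :
    dupCount (s ++ [c]) = dupCount (c :: s) :=
  dupCount_perm (List.perm_append_singleton c s)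

theorem dupCount_eq_zero_iff (s : List Char) : dupCount s = 0 ↔ s.Nodup := by
  unfold dupCount
  rw [Nat.cast_eq_zero, Finset.card_eq_zero, Finset.filter_eq_empty_iff,
    List.nodup_iff_count_le_one]
  constructor
  · intro h y
    by_cases hy : y ∈ s
    · have := h (List.mem_toFinset.mpr hy)
      omega
    · rw [List.count_eq_zero_of_not_mem hy]
      omega
  · intro h y _
    have := h y
    omega

theorem assAltLoop_of_ge (l : List Char) (w : Nat) (counts : PySem.Dict Char Int)
    (dups : Int) (j : Nat) (h : l.length ≤ j) :
    assAltLoop l w counts dups j = none := by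
  rw [assAltLoop]; simp [Nat.not_lt.mpr h]

-- main loop equivalence: A's `past` is always the reverse of the window of the last
-- min i w characters, and B's map/counter are that window's occurrence counts and
-- its number of duplicated characters.
theorem loop_eq (l : List Char) (count : Int) (w : Nat) (hw : (w : Int) = max count 0)
    (i : Nat) (past : List Char) (counts : PySem.Dict Char Int) (dups : Int)
    (hpast : past = ((l.take i).drop (i - w)).reverse)
    (hcounts : ∀ y, counts.getD y 0 = (((l.take i).drop (i - w)).count y : Int))
    (hdups : dups = dupCount ((l.take i).drop (i - w))) :
    assLoop l count past i = assAltLoop l w counts dups i := by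
  induction hn : l.length - i using Nat.strong_induction_on generalizing i past counts dups with
  | _ n ih =>
  by_cases h : i < l.length
  · have htake : l.take (i + 1) = l.take i ++ [l[i]] := by
      rw [List.take_add_one]; simp [List.getElem?_eq_getElem h]
    have hlentake : (l.take i).length = i := by
      simp [List.length_take]; omega
    have hplen : past.length = i - (i - w) := by
      subst hpast; simp [List.length_drop, List.length_take]; omega
    have hwinlen : ((l.take i).drop (i - w)).length = i - (i - w) := by
      simp [List.length_drop, List.length_take]; omega
    rw [assLoop, assAltLoop]
    simp only [dif_pos h]
    -- the occurrence counts after counts[c] += 1 describe the window grown by l[i]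
    have hc1 : ∀ y, (counts.insert l[i] (counts.getD l[i] 0 + 1)).getD y 0 =
        (((((l.take i).drop (i - w)) ++ [l[i]])).count y : Int) := by
      intro y
      rw [PySem.Dict.getD_insert]
      by_cases hyc : y = l[i]
      · rw [if_pos hyc, hyc, hcounts l[i], List.count_append]
        simp
      · have hcy : ¬ l[i] = y := fun hh => hyc hh.symm
        rw [if_neg hyc, hcounts y, List.count_append]
        simp [hcy]
    -- the duplicate counter after the n == 2 test describes the grown window
    have hd1 : (if counts.getD l[i] 0 + 1 = 2 then dups + 1 else dups) =
        dupCount ((((l.take i).drop (i - w)) ++ [l[i]])) := by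
      rw [dupCount_append_singleton, dupCount_cons, hcounts l[i], hdups]
      by_cases h2 : ((l.take i).drop (i - w)).count l[i] = 1
      · rw [if_pos h2, if_pos (by omega : ((((l.take i).drop (i - w)).count l[i] : Int) + 1 = 2))]
      · rw [if_neg h2, if_neg (by omega : ¬((((l.take i).drop (i - w)).count l[i] : Int) + 1 = 2))]
        omega
    by_cases hcnd : ((l[i] :: past).length : Int) > count
    · -- A pops and tests; B removes l[i-w] and tests: this happens exactly when w ≤ i
      have hwi : w ≤ i := by
        rcases Nat.lt_or_ge i w with h' | h'
        · exfalso; simp [hplen] at hcnd; omega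
        · exact h'
      have hdrop1 : (l.take i ++ [l[i]]).drop (i - w) =
          ((l.take i).drop (i - w)) ++ [l[i]] :=
        List.drop_append_of_le_length (by omega)
      have hwin : (l.take (i + 1)).drop (i + 1 - w) =
          (((l.take i).drop (i - w)) ++ [l[i]]).tail := by
        rw [htake]
        have : i + 1 - w = (i - w) + 1 := by omega
        rw [this, ← List.drop_drop, hdrop1, List.drop_one]
      -- the grown window starts with the character B evicts
      have hhead : (((l.take i).drop (i - w)) ++ [l[i]]) =
          l[i - w]'(by omega) :: ((l.take (i + 1)).drop (i + 1 - w)) := by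
        rw [hwin]
        rcases hE : ((l.take i).drop (i - w)) with _ | ⟨a, t⟩
        · have hw0 : w = 0 := by
            have := hwinlen; rw [hE] at this; simp at this; omega
          subst hw0
          simp
        · have hlt : i - w < i := by
            have hwl := hwinlen; rw [hE] at hwl; simp at hwl; omega
          have ha : a = l[i - w]'(by omega) := by
            have h0 : (l.take i)[i - w]? = some a := by
              rw [← List.head?_drop, hE]; rfl
            rw [List.getElem?_eq_getElem (by rw [hlentake]; exact hlt)] at h0
            have h1 : (l.take i)[i - w]'(by rw [hlentake]; exact hlt) = l[i - w]'(by omega) :=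
              List.getElem_take
            rw [h1] at h0
            exact (Option.some.inj h0).symm
          rw [ha]
          simp
      have hpast2 : (l[i] :: past).dropLast =
          ((l.take (i + 1)).drop (i + 1 - w)).reverse := by
        rw [hwin, hpast]
        rcases hE : (l.take i).drop (i - w) with _ | ⟨a, t⟩
        · simp
        · rw [List.reverse_cons,
            show l[i] :: (t.reverse ++ [a]) = (l[i] :: t.reverse) ++ [a] by simp,
            List.dropLast_concat]
          simp
      -- counts and counter after the eviction describe the new window
      have hcntd : (((((l.take i).drop (i - w)) ++ [l[i]])).count (l[i - w]'(by omega)) : Int) =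
          (((l.take (i + 1)).drop (i + 1 - w)).count (l[i - w]'(by omega)) : Int) + 1 := by
        rw [hhead, List.count_cons]
        simp
      have hc2 : ∀ y, ((counts.insert l[i] (counts.getD l[i] 0 + 1)).insert (l[i - w]'(by omega))
            ((counts.insert l[i] (counts.getD l[i] 0 + 1)).getD (l[i - w]'(by omega)) 0 - 1)).getD y 0 =
          ((((l.take (i + 1)).drop (i + 1 - w)).count y : Int)) := by
        intro y
        rw [PySem.Dict.getD_insert]
        by_cases hyd : y = l[i - w]'(by omega)
        · subst hyd
          rw [if_pos rfl, hc1, hcntd]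
          omega
        · have hdy : ¬ l[i - w]'(by omega) = y := fun hh => hyd hh.symm
          rw [if_neg hyd, hc1, hhead, List.count_cons]
          simp [hdy]
      have hd2 : (if (counts.insert l[i] (counts.getD l[i] 0 + 1)).getD (l[i - w]'(by omega)) 0 - 1 = 1
            then (if counts.getD l[i] 0 + 1 = 2 then dups + 1 else dups) - 1
            else (if counts.getD l[i] 0 + 1 = 2 then dups + 1 else dups)) =
          dupCount ((l.take (i + 1)).drop (i + 1 - w)) := by
        rw [hc1, hcntd, hd1, hhead, dupCount_cons]
        by_cases h2 : ((l.take (i + 1)).drop (i + 1 - w)).count (l[i - w]'(by omega)) = 1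
        · rw [if_pos h2, if_pos (by omega)]
          omega
        · rw [if_neg (by omega), if_neg (by omega)]
          omega
      -- the distinctness tests agree
      have hchk : (!containsDouble ((l[i] :: past).dropLast)) =
          decide (dupCount ((l.take (i + 1)).drop (i + 1 - w)) = 0) := by
        rw [hpast2, containsDouble_eq, Bool.not_not]
        simp [List.nodup_reverse, dupCount_eq_zero_iff]
      simp only [if_pos hcnd, dif_pos hwi]
      by_cases hz : (if (counts.insert l[i] (counts.getD l[i] 0 + 1)).getD (l[i - w]'(by omega)) 0 - 1 = 1
            then (if counts.getD l[i] 0 + 1 = 2 then dups + 1 else dups) - 1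
            else (if counts.getD l[i] 0 + 1 = 2 then dups + 1 else dups)) = 0
      · rw [if_pos hz]
        have : (!containsDouble ((l[i] :: past).dropLast)) = true := by
          rw [hchk]; rw [hd2] at hz; simp [hz]
        rw [if_pos this]
      · rw [if_neg hz]
        have hfalse : (!containsDouble ((l[i] :: past).dropLast)) = false := by
          rw [hchk]; rw [hd2] at hz; simp [hz]
        rw [if_neg (by simp [hfalse])]
        exact ih (l.length - (i + 1)) (by omega) (i + 1) _ _ _ hpast2 hc2 hd2 rfl
    · -- A only grows the list; B only grows the map: this happens exactly when i < w
      have hwi : i < w := by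
        rcases Nat.lt_or_ge i w with h' | h'
        · exact h'
        · exfalso; apply hcnd; simp [hplen]; omega
      have h1 : i + 1 - w = 0 := by omega
      have h0 : i - w = 0 := by omega
      have hgrow : (l.take (i + 1)).drop (i + 1 - w) = ((l.take i).drop (i - w)) ++ [l[i]] := by
        rw [h1, h0, List.drop_zero, List.drop_zero, htake]
      have hpast1 : l[i] :: past = ((l.take (i + 1)).drop (i + 1 - w)).reverse := by
        rw [hgrow, hpast, List.reverse_append]
        simp
      simp only [if_neg hcnd, dif_neg (by omega : ¬ w ≤ i)]
      exact ih (l.length - (i + 1)) (by omega) (i + 1) _ _ _ hpast1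
        (by rw [hgrow]; exact hc1) (by rw [hgrow]; exact hd1) rfl
  · rw [assLoop]
    simp only [dif_neg h]
    exact (assAltLoop_of_ge l w counts dups i (by omega)).symm

theorem ass_spec' (l : String) (count : Int) : ass l count = ass_alt l count := by
  unfold ass ass_alt
  exact loop_eq l.toList count ((max count 0).toNat)
    (Int.toNat_of_nonneg (le_max_right _ _)) 0 [] PySem.Dict.empty 0
    (by simp) (by intro y; simp [PySem.Dict.getD_empty]) (by simp [dupCount_nil])

-- ===== VERDICT (by name: the statement is the Claim_ definition above) =====
theorem ass_spec : Claim_equal_ass := by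
  intro l count _
  unfold Spec_ass
  exact ass_spec' l count
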